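-- pv_equiv track=rewrite | github.com/YJAJ/Intelligent_systems | Assignment1/Utility.py | is_queen_safe_col
-- ===== SOURCE A (Python) =====
-- def is_queen_safe_col(queens_state, no_queen):
--     # same with the function above but only for column check
--     safe_state = True
--
--     for i in range(len(queens_state) - 1):
--         for j in range(i + 1, len(queens_state)):
--             # check column overlapping
--             if queens_state[i]%no_queen == queens_state[j]%no_queen:
--                 safe_state = False
--                 return safe_state
--     return safe_state
-- ===== SOURCE B (Python) =====
-- def is_queen_safe_col(queens_state, no_queen):
--     # One pass with a hash set of residues instead of the nested pairwise scan.
--     # Guard len < 2 first: A never computes a modulo then, so no_queen == 0 is fine there.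
--     if len(queens_state) < 2:
--         return True
--     seen = set()
--     for q in queens_state:
--         r = q % no_queen
--         if r in seen:
--             return False
--         seen.add(r)
--     return True
-- ===== Notes on version B (the rewrite author's own statement) =====
-- stated objective: alternative
-- what changed: Replaces the nested pairwise index scan with a single pass that records each residue in a hash set and fails on the first repeat.
import Mathlib
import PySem

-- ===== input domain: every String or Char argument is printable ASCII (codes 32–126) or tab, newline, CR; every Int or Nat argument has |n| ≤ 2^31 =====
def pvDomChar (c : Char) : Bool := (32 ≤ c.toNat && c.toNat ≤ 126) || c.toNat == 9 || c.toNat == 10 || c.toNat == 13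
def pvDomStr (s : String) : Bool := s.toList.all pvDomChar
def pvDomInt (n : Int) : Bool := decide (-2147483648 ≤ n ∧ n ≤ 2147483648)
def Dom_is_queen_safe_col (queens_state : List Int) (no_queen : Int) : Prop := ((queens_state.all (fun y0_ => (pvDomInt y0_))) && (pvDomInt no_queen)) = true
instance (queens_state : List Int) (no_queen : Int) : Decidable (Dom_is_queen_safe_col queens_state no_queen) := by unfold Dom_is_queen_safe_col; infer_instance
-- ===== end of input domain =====

-- B replaces A's nested pairwise scan with a single pass over a set of seen residues (a different algorithm of the same observed cost on the benchmark inputs).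


-- ===== PORT A =====
-- for i in range(len-1): for j in range(i+1, len): the inner loop visits exactly the
-- elements after position i, so each outer step compares the head of the current tail
-- with every element of its rest; early 'return False' = the 'if … then false' branch.
def pvAOuter (n : Int) : List Int → Bool
  | [] => true
  | x :: rest =>
      if rest.any (fun y => PySem.Int.mod x n == PySem.Int.mod y n) then false
      else pvAOuter n rest

def is_queen_safe_col (queens_state : List Int) (no_queen : Int) : Bool :=
  pvAOuter no_queen queens_state

-- ===== PORT B =====
def pvBGo (n : Int) (seen : PySem.Set Int) : List Int → Bool
  | [] => true
  | q :: rest =>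
      let r := PySem.Int.mod q n
      if PySem.Set.contains seen r then false
      else pvBGo n (PySem.Set.add seen r) rest

def is_queen_safe_col_alt (queens_state : List Int) (no_queen : Int) : Bool :=
  if queens_state.length < 2 then true
  else pvBGo no_queen PySem.Set.empty queens_state

-- ===== PRECONDITION & SPEC =====
-- Pre_ excludes exactly the inputs where Python A raises ZeroDivisionError:
-- no_queen == 0 with at least two queens (the modulo is only reached then).
def Pre_is_queen_safe_col (queens_state : List Int) (no_queen : Int) : Prop :=
  queens_state.length < 2 ∨ no_queen ≠ 0
instance (queens_state : List Int) (no_queen : Int) : Decidable (Pre_is_queen_safe_col queens_state no_queen) := by unfold Pre_is_queen_safe_col; infer_instance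
def pvWitness_is_queen_safe_col : List Int × Int := ([1, 2, 3], 7)

def Spec_is_queen_safe_col (queens_state : List Int) (no_queen : Int) (out : Bool) : Prop := out = is_queen_safe_col_alt queens_state no_queen
instance (queens_state : List Int) (no_queen : Int) (out : Bool) : Decidable (Spec_is_queen_safe_col queens_state no_queen out) := by unfold Spec_is_queen_safe_col; infer_instance

-- ===== CLAIM (what is proved, stated in full; the proofs are below) =====
def Claim_equal_is_queen_safe_col : Prop := ∀ (queens_state : List Int) (no_queen : Int), Dom_is_queen_safe_col queens_state no_queen → Pre_is_queen_safe_col queens_state no_queen → Spec_is_queen_safe_col queens_state no_queen (is_queen_safe_col queens_state no_queen)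

-- ===== LEMMAS AND PROOFS =====

-- B's loop = "no residue of l is already in seen" AND A's verdict on l.
theorem pvBGo_iff (n : Int) (l : List Int) : ∀ (seen : PySem.Set Int),
    pvBGo n seen l = true
      ↔ ((∀ y ∈ l, PySem.Int.mod y n ∉ seen) ∧ pvAOuter n l = true) := by
  induction l with
  | nil => intro seen; simp [pvBGo, pvAOuter]
  | cons x rest ih =>
    intro seen
    simp only [pvBGo, pvAOuter]
    by_cases hm : PySem.Int.mod x n ∈ seen
    · have hc : PySem.Set.contains seen (PySem.Int.mod x n) = true := by
        simp [PySem.Set.contains, hm]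
      simp [hm]
    · have hc : PySem.Set.contains seen (PySem.Int.mod x n) = false := by
        simp [PySem.Set.contains, hm]
      simp only [hc, Bool.false_eq_true, if_false, ih, PySem.Set.mem_add, List.mem_cons]
      split
      next ha =>
        rcases List.any_eq_true.mp ha with ⟨y, hy, hxy⟩
        have hxy' : PySem.Int.mod x n = PySem.Int.mod y n := beq_iff_eq.mp hxy
        simp only [Bool.false_eq_true, and_false, iff_false, not_and]
        intro h1 _
        exact (h1 y hy) (Or.inr hxy'.symm)
      next ha =>
        have hne : ∀ y ∈ rest, PySem.Int.mod x n ≠ PySem.Int.mod y n := by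
          intro y hy he
          exact ha (List.any_eq_true.mpr ⟨y, hy, beq_iff_eq.mpr he⟩)
        constructor
        · rintro ⟨h1, h2⟩
          refine ⟨?_, h2⟩
          rintro y (rfl | hy)
          · exact hm
          · exact fun h => (h1 y hy) (Or.inl h)
        · rintro ⟨h1, h2⟩
          refine ⟨?_, h2⟩
          intro y hy
          rintro (h | h)
          · exact (h1 y (Or.inr hy)) h
          · exact (hne y hy) h.symm

-- ===== VERDICT (by name: the statement is the Claim_ definition above) =====
theorem is_queen_safe_col_spec : Claim_equal_is_queen_safe_col := by
  intro qs n _ _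
  unfold Spec_is_queen_safe_col is_queen_safe_col is_queen_safe_col_alt
  by_cases h : qs.length < 2
  · match qs, h with
    | [], _ => simp [pvAOuter]
    | [x], _ => simp [pvAOuter]
  · simp only [h, if_false]
    rw [Bool.eq_iff_iff, pvBGo_iff]
    simp [PySem.Set.empty]
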